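-- pv_equiv track=rewrite | github.com/ChrisParra24/lifeStore_Proyect | consignas.py | calificaciones_productos
-- ===== SOURCE A (Python) =====
-- def calificaciones_productos(productos,ventas):
--     diccionario = {}
--     for producto in productos: # iteramos sobre los productos
--         if producto[0] not in diccionario.keys(): # checamos si no esta el id_product como clave en el diccionario
--             diccionario[producto[0]] = [] # de ser asi creamos la clave y tambien una lista en esa clave
--             for venta in ventas: # iteramos sobre las ventas
--                 if venta[1] == producto[0]: # checamos que coincida el id_product de los elementos en cuestion
--                     diccionario[producto[0]].append(venta[2]) # si coincide entonces agregamos la reseña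
--     # regresamos el diccionario
--     return diccionario
-- ===== SOURCE B (Python) =====
-- # B: single-pass grouping — create the product-id buckets once as dict keys, then one
-- # pass over ventas appending each review to its product's bucket (too-short ventas are skipped).
-- def calificaciones_productos(productos, ventas):
--     agrupado = {}
--     for producto in productos:
--         agrupado.setdefault(producto[0], [])
--     for venta in ventas:
--         if len(venta) >= 3 and venta[1] in agrupado:
--             agrupado[venta[1]].append(venta[2])
--     return agrupado
-- ===== Notes on version B (the rewrite author's own statement) =====
-- stated objective: alternative
-- what changed: Instead of rescanning all ventas for every fresh product id (nested loops), B creates all buckets in one pass over productos and distributes the reviews in one pass over ventas via dict membership, skipping ventas too short to carry a review.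
import Mathlib
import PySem

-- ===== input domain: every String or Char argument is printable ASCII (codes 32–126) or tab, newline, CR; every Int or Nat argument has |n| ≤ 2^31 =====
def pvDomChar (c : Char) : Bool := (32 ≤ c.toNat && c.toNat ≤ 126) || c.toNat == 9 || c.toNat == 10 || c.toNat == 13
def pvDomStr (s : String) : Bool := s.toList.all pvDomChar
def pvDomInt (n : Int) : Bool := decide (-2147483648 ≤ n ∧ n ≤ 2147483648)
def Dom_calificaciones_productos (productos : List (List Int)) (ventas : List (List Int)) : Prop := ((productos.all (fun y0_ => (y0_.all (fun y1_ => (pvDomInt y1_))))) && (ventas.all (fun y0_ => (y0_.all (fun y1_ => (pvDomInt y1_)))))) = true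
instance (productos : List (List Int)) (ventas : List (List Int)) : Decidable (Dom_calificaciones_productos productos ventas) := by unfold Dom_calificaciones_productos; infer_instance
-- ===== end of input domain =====

-- B replaces A's nested loops (one full scan of ventas per fresh product id) by one
-- bucket-creating pass over productos and one distributing pass over ventas (alternative algorithm).



-- ===== PORT A =====
-- inner 'for venta in ventas' loop body of A (runs only for a fresh key)
def pvInnerA (key : Int) (dd : PySem.Dict Int (List Int)) (venta : List Int) : PySem.Dict Int (List Int) :=
  match PySem.List.pyGet? venta 1 with            -- venta[1]  (none = IndexError, outside Pre_)
  | none => dd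
  | some vid =>
    if vid = key then
      match PySem.List.pyGet? venta 2 with        -- venta[2]  (none = IndexError, outside Pre_)
      | none => dd
      | some r => dd.modify key [] (fun l => l ++ [r])   -- diccionario[producto[0]].append(venta[2])
    else dd

-- outer 'for producto in productos' loop body of A
def pvStepA (ventas : List (List Int)) (d : PySem.Dict Int (List Int)) (producto : List Int) : PySem.Dict Int (List Int) :=
  match PySem.List.pyGet? producto 0 with         -- producto[0]  (none = IndexError, outside Pre_)
  | none => d
  | some key =>
    if key ∈ d.keys then d                        -- 'if producto[0] not in diccionario.keys()' (negated)
    else ventas.foldl (pvInnerA key) (d.insert key [])   -- diccionario[producto[0]] = [] ; inner loop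

def calificaciones_productos (productos : List (List Int)) (ventas : List (List Int)) : List (Int × List Int) :=
  (productos.foldl (pvStepA ventas) PySem.Dict.empty).items

-- ===== PORT B =====
-- body of B's 'for venta in ventas' distributing pass: 'if len(venta) >= 3 and venta[1] in agrupado'
def pvStepB (d : PySem.Dict Int (List Int)) (venta : List Int) : PySem.Dict Int (List Int) :=
  if 3 ≤ venta.length then
    match PySem.List.pyGet? venta 1, PySem.List.pyGet? venta 2 with   -- venta[1], venta[2]: in range under the length guard
    | some k, some r =>
      if d.contains k then d.modify k [] (fun l => l ++ [r])          -- agrupado[venta[1]].append(venta[2])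
      else d
    | _, _ => d
  else d

def calificaciones_productos_alt (productos : List (List Int)) (ventas : List (List Int)) : List (Int × List Int) :=
  let agrupado := productos.foldl (fun d p =>
      match PySem.List.pyGet? p 0 with            -- producto[0]
      | none => d
      | some k => d.setdefault k []) PySem.Dict.empty    -- agrupado.setdefault(producto[0], [])
  (ventas.foldl pvStepB agrupado).items

-- ===== PRECONDITION & SPEC =====
-- Pre_ excludes exactly the inputs on which A raises IndexError: an empty producto; a venta
-- shorter than 2 when productos is nonempty (A's inner loop then scans every venta); and a
-- venta of length 2 whose id venta[1] matches a product id (A then reads venta[2]).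
def Pre_calificaciones_productos (productos : List (List Int)) (ventas : List (List Int)) : Prop :=
  (∀ p ∈ productos, p ≠ []) ∧
  (productos ≠ [] → ∀ v ∈ ventas, 2 ≤ v.length) ∧
  (∀ v ∈ ventas, v.getD 1 0 ∈ productos.map List.headI → 3 ≤ v.length)
instance (productos : List (List Int)) (ventas : List (List Int)) : Decidable (Pre_calificaciones_productos productos ventas) := by unfold Pre_calificaciones_productos; infer_instance

def pvWitness_calificaciones_productos : List (List Int) × List (List Int) :=
  ([[1, 10], [2, 20], [1, 30]], [[7, 1, 5], [8, 2, 4], [9, 1, 3], [10, 6]])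

def Spec_calificaciones_productos (productos : List (List Int)) (ventas : List (List Int)) (out : List (Int × List Int)) : Prop := out = calificaciones_productos_alt productos ventas
instance (productos : List (List Int)) (ventas : List (List Int)) (out : List (Int × List Int)) : Decidable (Spec_calificaciones_productos productos ventas out) := by unfold Spec_calificaciones_productos; infer_instance

-- ===== CLAIM (what is proved, stated in full; the proofs are below) =====
def Claim_equal_calificaciones_productos : Prop := ∀ (productos : List (List Int)) (ventas : List (List Int)), Dom_calificaciones_productos productos ventas → Pre_calificaciones_productos productos ventas → Spec_calificaciones_productos productos ventas (calificaciones_productos productos ventas)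

-- ===== LEMMAS AND PROOFS =====

-- the id and the review carried by a venta (its 2nd and 3rd element)
def pvKey (v : List Int) : Int := v.getD 1 0
def pvVal (v : List Int) : Int := v.getD 2 0
-- the reviews of product k, in ventas order
def pvCollect (k : Int) (ventas : List (List Int)) : List Int :=
  (ventas.filter (fun v => pvKey v == k)).map pvVal

theorem pvGet1 (v : List Int) (h : 2 ≤ v.length) : PySem.List.pyGet? v 1 = some (pvKey v) := by
  match v, h with
  | a :: b :: t, _ => simp [PySem.List.pyGet?, PySem.List.pyIdx?, pvKey]

theorem pvGet2 (v : List Int) (h : 3 ≤ v.length) : PySem.List.pyGet? v 2 = some (pvVal v) := by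
  match v, h with
  | a :: b :: c :: t, _ =>
    have ht : (2:Int) ≤ (t.length:Int) + 1 + 1 := by omega
    simp [PySem.List.pyGet?, PySem.List.pyIdx?, pvVal, ht]

theorem pvGet0 (p : List Int) (h : p ≠ []) : PySem.List.pyGet? p 0 = some p.headI := by
  match p, h with
  | a :: t, _ => simp [PySem.List.pyGet?, PySem.List.pyIdx?]

theorem pvCollect_cons_eq (k : Int) (v : List Int) (l : List (List Int)) (h : pvKey v = k) :
    pvCollect k (v :: l) = pvVal v :: pvCollect k l := by
  simp [pvCollect, h]

theorem pvCollect_cons_ne (k : Int) (v : List Int) (l : List (List Int)) (h : ¬ pvKey v = k) :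
    pvCollect k (v :: l) = pvCollect k l := by
  simp [pvCollect, h]

-- A's inner loop over ventas: keys unchanged, the entry of `key` gains pvCollect key l, others untouched
theorem pvInnerA_spec (key : Int) (l : List (List Int)) (d : PySem.Dict Int (List Int))
    (hd : d.contains key = true)
    (h2 : ∀ v ∈ l, 2 ≤ v.length) (h3 : ∀ v ∈ l, pvKey v = key → 3 ≤ v.length) :
    (l.foldl (pvInnerA key) d).keys = d.keys ∧
    ∀ c, (l.foldl (pvInnerA key) d).getD c [] =
      if c = key then d.getD key [] ++ pvCollect key l else d.getD c [] := by
  induction l generalizing d with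
  | nil => simp [pvCollect]
  | cons v l ih =>
    have hv2 := h2 v (by simp)
    by_cases hk : pvKey v = key
    · have hv3 := h3 v (by simp) hk
      have step : pvInnerA key d v = d.modify key [] (fun l => l ++ [pvVal v]) := by
        simp [pvInnerA, pvGet1 v hv2, pvGet2 v hv3, hk]
      have hd' : (d.modify key [] (fun l => l ++ [pvVal v])).contains key = true := by
        simp [PySem.Dict.contains_modify, hd]
      obtain ⟨hkeys, hget⟩ := ih (d.modify key [] (fun l => l ++ [pvVal v])) hd'
        (fun w hw => h2 w (by simp [hw])) (fun w hw => h3 w (by simp [hw]))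
      refine ⟨?_, ?_⟩
      · rw [List.foldl_cons, step, hkeys, PySem.Dict.keys_modify,
          PySem.Dict.keys_insert_of_contains _ _ hd]
      · intro c
        rw [List.foldl_cons, step, hget c, PySem.Dict.getD_modify]
        by_cases hc : c = key
        · simp [hc, pvCollect_cons_eq key v l hk]
        · simp [hc, PySem.Dict.getD_modify]
    · have step : pvInnerA key d v = d := by
        simp [pvInnerA, pvGet1 v hv2, hk]
      obtain ⟨hkeys, hget⟩ := ih d hd (fun w hw => h2 w (by simp [hw])) (fun w hw => h3 w (by simp [hw]))
      refine ⟨by rw [List.foldl_cons, step, hkeys], ?_⟩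
      intro c
      rw [List.foldl_cons, step, hget c]
      by_cases hc : c = key
      · simp [hc, pvCollect_cons_ne key v l hk]
      · simp [hc]

-- A's outer loop: keys grow by the fresh product ids; each fresh id's entry holds its reviews
theorem pvFoldA_spec (ventas : List (List Int)) (productos : List (List Int))
    (d : PySem.Dict Int (List Int))
    (hp : ∀ p ∈ productos, p ≠ [])
    (h2 : ∀ v ∈ ventas, 2 ≤ v.length)
    (h3 : ∀ v ∈ ventas, pvKey v ∈ productos.map List.headI → 3 ≤ v.length) :
    (productos.foldl (pvStepA ventas) d).keys = PySem.Set.update d.keys (productos.map List.headI) ∧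
    ∀ c, (productos.foldl (pvStepA ventas) d).getD c [] =
      if d.contains c then d.getD c []
      else if c ∈ productos.map List.headI then pvCollect c ventas else [] := by
  induction productos generalizing d with
  | nil =>
    refine ⟨by simp [PySem.Set.update], ?_⟩
    intro c
    by_cases hc : d.contains c
    · simp [hc]
    · simp [hc, PySem.Dict.getD_of_not_contains _ _ (by simpa using hc)]
  | cons p ps ih =>
    have hph := hp p (by simp)
    by_cases hmem : p.headI ∈ d.keys
    · have hcont : d.contains p.headI = true := (PySem.Dict.contains_iff_mem_keys d _).mpr hmem
      have step : pvStepA ventas d p = d := by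
        simp only [pvStepA, pvGet0 p hph]
        rw [if_pos hmem]
      obtain ⟨hkeys, hget⟩ := ih d (fun q hq => hp q (by simp [hq]))
        (fun v hv hm => h3 v hv (by simp; right; simpa using hm))
      refine ⟨?_, ?_⟩
      · have hadd : PySem.Set.add d.keys p.headI = d.keys := by
          simp [PySem.Set.add, hmem]
        rw [List.foldl_cons, step, hkeys]
        simp only [List.map_cons, PySem.Set.update, List.foldl_cons, hadd]
      · intro c
        rw [List.foldl_cons, step, hget c]
        by_cases hc : d.contains c
        · simp [hc]
        · have hcp : ¬ c = p.headI := fun h => by rw [h] at hc; exact hc hcont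
          simp [hc, hcp]
    · have hcont : d.contains p.headI = false := by
        by_contra h
        exact hmem ((PySem.Dict.contains_iff_mem_keys d _).mp (by simpa using h))
      have hd' : (d.insert p.headI []).contains p.headI = true := PySem.Dict.contains_insert_self _ _ _
      obtain ⟨ikeys, iget⟩ := pvInnerA_spec p.headI ventas (d.insert p.headI []) hd' h2
        (fun v hv hk => h3 v hv (by simp [hk]))
      have step : pvStepA ventas d p = ventas.foldl (pvInnerA p.headI) (d.insert p.headI []) := by
        simp [pvStepA, pvGet0 p hph, hmem]
      have hdk : (ventas.foldl (pvInnerA p.headI) (d.insert p.headI [])).keys = d.keys ++ [p.headI] := by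
        rw [ikeys, PySem.Dict.keys_insert_of_not_contains _ _ hcont]
      obtain ⟨hkeys, hget⟩ := ih (ventas.foldl (pvInnerA p.headI) (d.insert p.headI []))
        (fun q hq => hp q (by simp [hq]))
        (fun v hv hm => h3 v hv (by simp; right; simpa using hm))
      have hcontF : ∀ c, (ventas.foldl (pvInnerA p.headI) (d.insert p.headI [])).contains c = true
          ↔ (c = p.headI ∨ d.contains c = true) := by
        intro c
        rw [PySem.Dict.contains_iff_mem_keys, hdk]
        simp [PySem.Dict.contains_iff_mem_keys, or_comm]
      refine ⟨?_, ?_⟩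
      · rw [List.foldl_cons, step, hkeys, hdk]
        simp only [List.map_cons, PySem.Set.update, List.foldl_cons]
        congr 1
        simp [PySem.Set.add, hmem]
      · intro c
        rw [List.foldl_cons, step, hget c]
        by_cases hcp : c = p.headI
        · have hdc : d.contains c = false := by rw [hcp]; exact hcont
          rw [if_pos ((hcontF c).mpr (Or.inl hcp)), iget c, if_pos hcp,
            PySem.Dict.getD_insert, if_pos rfl, hdc]
          simp [hcp]
        · by_cases hc : d.contains c = true
          · rw [if_pos ((hcontF c).mpr (Or.inr hc)), iget c, if_neg hcp,
              PySem.Dict.getD_insert, if_neg hcp, if_pos hc]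
          · have hcf : (ventas.foldl (pvInnerA p.headI) (d.insert p.headI [])).contains c = false := by
              cases h : (ventas.foldl (pvInnerA p.headI) (d.insert p.headI [])).contains c
              · rfl
              · rcases (hcontF c).mp h with h' | h'
                · exact absurd h' hcp
                · exact absurd h' hc
            rw [if_neg (by simp [hcf]), if_neg hc]
            by_cases hin : c ∈ List.map List.headI ps
            · have : c ∈ List.map List.headI (p :: ps) := by
                simp only [List.map_cons, List.mem_cons]; exact Or.inr hin
              rw [if_pos hin, if_pos this]
            · have : ¬ c ∈ List.map List.headI (p :: ps) := by
                simp only [List.map_cons, List.mem_cons]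
                rintro (h | h)
                · exact hcp h
                · exact hin h
              rw [if_neg hin, if_neg this]

-- B's bucket-creating pass: keys are the distinct product ids, every bucket defaults to []
theorem pvSetdefaultFold_spec (l : List Int) (d : PySem.Dict Int (List Int)) :
    ((l.foldl (fun d k => d.setdefault k []) d).keys = PySem.Set.update d.keys l) ∧
    ∀ c, (l.foldl (fun d k => d.setdefault k []) d).getD c [] = d.getD c [] := by
  induction l generalizing d with
  | nil => exact ⟨rfl, fun c => rfl⟩
  | cons k l ih =>
    obtain ⟨hkeys, hget⟩ := ih (d.setdefault k [])
    refine ⟨?_, ?_⟩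
    · rw [List.foldl_cons, hkeys, PySem.Dict.keys_setdefault]
      simp only [PySem.Set.update, List.foldl_cons]
      congr 1
      by_cases hc : d.contains k = true
      · have hmemk : k ∈ d.keys := (PySem.Dict.contains_iff_mem_keys d _).mp hc
        simp [hc, PySem.Set.add, hmemk]
      · have hnk : ¬ k ∈ d.keys := fun h => hc ((PySem.Dict.contains_iff_mem_keys d _).mpr h)
        simp [hc, PySem.Set.add, hnk]
    · intro c
      rw [List.foldl_cons, hget c]
      by_cases hc : c = k
      · subst hc; exact PySem.Dict.getD_setdefault_self d c [] []
      · rw [PySem.Dict.getD_eq_get?_getD, PySem.Dict.get?_setdefault_of_ne d _ hc,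
          ← PySem.Dict.getD_eq_get?_getD]

-- B's distributing pass: keys unchanged; every existing bucket gains its reviews
theorem pvFoldB_spec (l : List (List Int)) (d : PySem.Dict Int (List Int))
    (h3 : ∀ v ∈ l, d.contains (pvKey v) = true → 3 ≤ v.length) :
    (l.foldl pvStepB d).keys = d.keys ∧
    ∀ c, (l.foldl pvStepB d).getD c [] =
      if d.contains c then d.getD c [] ++ pvCollect c l else d.getD c [] := by
  induction l generalizing d with
  | nil =>
    refine ⟨rfl, fun c => ?_⟩
    by_cases hc : d.contains c <;> simp [hc, pvCollect]
  | cons v l ih =>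
    by_cases hlen : 3 ≤ v.length
    · by_cases hcv : d.contains (pvKey v) = true
      · have step : pvStepB d v = d.modify (pvKey v) [] (fun l => l ++ [pvVal v]) := by
          simp [pvStepB, hlen, pvGet1 v (by omega), pvGet2 v hlen, hcv]
        have hco : ∀ c, (d.modify (pvKey v) [] (fun l => l ++ [pvVal v])).contains c = d.contains c := by
          intro c
          rw [PySem.Dict.contains_modify]
          by_cases hc : c = pvKey v
          · simp [hc, hcv]
          · simp [hc]
        obtain ⟨hkeys, hget⟩ := ih (d.modify (pvKey v) [] (fun l => l ++ [pvVal v]))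
          (fun w hw hcw => h3 w (by simp [hw]) (by rw [← hco (pvKey w)]; exact hcw))
        refine ⟨?_, ?_⟩
        · rw [List.foldl_cons, step, hkeys, PySem.Dict.keys_modify,
            PySem.Dict.keys_insert_of_contains _ _ hcv]
        · intro c
          rw [List.foldl_cons, step, hget c, hco c, PySem.Dict.getD_modify]
          by_cases hc : c = pvKey v
          · rw [pvCollect_cons_eq c v l hc.symm]
            simp [hc, hcv]
          · by_cases hdc : d.contains c = true
            · simp [hdc, hc, pvCollect_cons_ne c v l (fun h => hc h.symm)]
            · simp [hdc, hc]
      · have step : pvStepB d v = d := by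
          simp [pvStepB, hlen, pvGet1 v (by omega), pvGet2 v hlen, hcv]
        obtain ⟨hkeys, hget⟩ := ih d (fun w hw => h3 w (by simp [hw]))
        refine ⟨by rw [List.foldl_cons, step, hkeys], ?_⟩
        intro c
        rw [List.foldl_cons, step, hget c]
        by_cases hdc : d.contains c = true
        · have hc : ¬ pvKey v = c := fun h => by rw [h] at hcv; exact hcv hdc
          simp [hdc, pvCollect_cons_ne c v l hc]
        · simp [hdc]
    · have hcv : d.contains (pvKey v) = false := by
        cases h : d.contains (pvKey v)
        · rfl
        · exact absurd (h3 v (by simp) h) hlen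
      have step : pvStepB d v = d := by
        simp [pvStepB, hlen]
      obtain ⟨hkeys, hget⟩ := ih d (fun w hw => h3 w (by simp [hw]))
      refine ⟨by rw [List.foldl_cons, step, hkeys], ?_⟩
      intro c
      rw [List.foldl_cons, step, hget c]
      by_cases hdc : d.contains c = true
      · have hc : ¬ pvKey v = c := fun h => by rw [h] at hcv; simp [hcv] at hdc
        simp [hdc, pvCollect_cons_ne c v l hc]
      · simp [hdc]

-- ===== VERDICT (by name: the statement is the Claim_ definition above) =====
theorem calificaciones_productos_spec : Claim_equal_calificaciones_productos := by
  intro productos ventas _ hpre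
  obtain ⟨hp, hv2, hv3⟩ := hpre
  unfold Spec_calificaciones_productos
  unfold calificaciones_productos calificaciones_productos_alt
  -- rewrite B's bucket pass to a fold over the heads
  have hB0 : productos.foldl (fun d p =>
      match PySem.List.pyGet? p 0 with
      | none => d
      | some k => d.setdefault k ([] : List Int)) (PySem.Dict.empty : PySem.Dict Int (List Int))
      = (productos.map List.headI).foldl (fun d k => d.setdefault k ([] : List Int)) (PySem.Dict.empty : PySem.Dict Int (List Int)) := by
    rw [List.foldl_map]
    exact PySem.List.foldl_congr_mem _ _ _ _ (fun acc x hx => by simp [pvGet0 x (hp x hx)])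
  obtain ⟨gKeys, gGet⟩ := pvSetdefaultFold_spec (productos.map List.headI) PySem.Dict.empty
  set g := (productos.map List.headI).foldl (fun d k => d.setdefault k []) PySem.Dict.empty with hg
  have gKeys' : g.keys = PySem.Set.ofList (productos.map List.headI) := by
    rw [gKeys, PySem.Set.ofList_eq_foldl]; rfl
  have gContains : ∀ c, g.contains c = true ↔ c ∈ productos.map List.headI := by
    intro c
    rw [PySem.Dict.contains_iff_mem_keys, gKeys', PySem.Set.mem_ofList]
  have hKeyD : ∀ v ∈ ventas, g.contains (pvKey v) = true → 3 ≤ v.length :=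
    fun v hv' hc => hv3 v hv' ((gContains (pvKey v)).mp hc)
  obtain ⟨bKeys, bGet⟩ := pvFoldB_spec ventas g hKeyD
  rcases hPe : productos with _ | ⟨p0, ps⟩
  · -- productos = []: A returns the empty dict's items; B's buckets are empty so nothing is distributed
    subst hPe
    rw [hB0]
    show (List.foldl (pvStepA ventas) PySem.Dict.empty []).items = (List.foldl pvStepB g ventas).items
    rw [PySem.Dict.items_eq_map_keys (List.foldl pvStepB g ventas)
      (by rw [bKeys, gKeys']; exact PySem.Set.nodup_ofList _) ([] : List Int), bKeys, gKeys']
    rfl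
  · -- productos ≠ []: every venta has length ≥ 2, matching ones ≥ 3
    have h2 : ∀ v ∈ ventas, 2 ≤ v.length := hv2 (by rw [hPe]; simp)
    rw [← hPe] at *
    obtain ⟨aKeys, aGet⟩ := pvFoldA_spec ventas productos PySem.Dict.empty hp h2 hv3
    have aKeys' : (productos.foldl (pvStepA ventas) PySem.Dict.empty).keys
        = PySem.Set.ofList (productos.map List.headI) := by
      rw [aKeys, PySem.Set.ofList_eq_foldl]; rfl
    rw [hB0]
    rw [PySem.Dict.items_eq_map_keys _ (by rw [aKeys']; exact PySem.Set.nodup_ofList _) ([] : List Int),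
      PySem.Dict.items_eq_map_keys _ (by rw [bKeys, gKeys']; exact PySem.Set.nodup_ofList _) ([] : List Int),
      aKeys', bKeys, gKeys']
    apply List.map_congr_left
    intro k hk
    have hkm : k ∈ productos.map List.headI := (PySem.Set.mem_ofList _ _).mp hk
    have : PySem.Dict.contains (PySem.Dict.empty : PySem.Dict Int (List Int)) k = false := rfl
    rw [aGet k, bGet k, gGet k]
    simp [this, hkm, (gContains k).mpr hkm]
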